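-- pv_equiv track=rewrite | github.com/GabrielHenriquefs/Bot-de-pesquisa | bot_pesquisa.py | formatar_resultados
-- ===== SOURCE A (Python) =====
-- def formatar_resultados(resultados):
--     texto_formatado = ""
--     palavras = 0
--     for resultado in resultados:
--         texto_formatado += resultado + " "
--         palavras += len(resultado.split())
--         if palavras >= 150:
--             break
--     return texto_formatado
-- ===== SOURCE B (Python) =====
-- def formatar_resultados(resultados):
--     # prefix word counts, then cutoff index, then build the string
--     cum = []
--     total = 0
--     for r in resultados:
--         total += len(r.split())
--         cum.append(total)
--     cut = next((i + 1 for i, c in enumerate(cum) if c >= 150), len(resultados))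
--     return ''.join(r + ' ' for r in resultados[:cut])
-- ===== Notes on version B (the rewrite author's own statement) =====
-- stated objective: alternative
-- what changed: Replaces the fused accumulate-and-break loop with three separate passes: prefix word-count totals, a scan for the first index reaching 150, and a join over the inclusive slice up to that index.
import Mathlib
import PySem

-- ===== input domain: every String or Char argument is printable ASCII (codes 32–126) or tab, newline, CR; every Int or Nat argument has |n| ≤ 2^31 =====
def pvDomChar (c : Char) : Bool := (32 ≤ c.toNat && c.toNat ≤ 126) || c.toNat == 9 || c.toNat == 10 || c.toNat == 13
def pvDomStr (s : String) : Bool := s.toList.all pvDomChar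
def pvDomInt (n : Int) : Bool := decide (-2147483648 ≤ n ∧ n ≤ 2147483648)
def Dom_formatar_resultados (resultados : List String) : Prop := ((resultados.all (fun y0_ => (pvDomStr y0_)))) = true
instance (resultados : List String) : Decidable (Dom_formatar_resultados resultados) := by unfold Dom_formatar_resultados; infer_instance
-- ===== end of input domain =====

-- B replaces A's fused accumulate-and-break loop with three passes (prefix totals, cutoff scan, join of the slice); objective: alternative decomposition, same cost.

-- ===== PORT A =====
-- the for-loop with its two accumulators and the early break
def pvLoopA : List String → String → Int → String
  | [], texto, _ => texto
  | r :: rest, texto, palavras =>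
    let texto' := texto ++ (r ++ " ")
    let palavras' := palavras + ((PySem.Str.split₀ r).length : Int)
    if palavras' ≥ 150 then texto' else pvLoopA rest texto' palavras'

def formatar_resultados (resultados : List String) : String :=
  pvLoopA resultados "" 0

-- ===== PORT B =====
-- first pass: running totals of word counts (cum)
def pvCum : Int → List String → List Int
  | _, [] => []
  | total, r :: rest =>
    let total' := total + ((PySem.Str.split₀ r).length : Int)
    total' :: pvCum total' rest

-- second pass: next((i+1 for i,c in enumerate(cum) if c >= 150), default)
def pvCut : List Int → Nat → Nat → Nat
  | [], _, dflt => dflt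
  | c :: cs, i, dflt => if c ≥ 150 then i + 1 else pvCut cs (i + 1) dflt

def formatar_resultados_alt (resultados : List String) : String :=
  let cum := pvCum 0 resultados
  let cut := pvCut cum 0 resultados.length
  String.join ((resultados.take cut).map (fun r => r ++ " "))

-- ===== PRECONDITION & SPEC =====
def Spec_formatar_resultados (resultados : List String) (out : String) : Prop := out = formatar_resultados_alt resultados
instance (resultados : List String) (out : String) : Decidable (Spec_formatar_resultados resultados out) := by unfold Spec_formatar_resultados; infer_instance

-- ===== CLAIM (what is proved, stated in full; the proofs are below) =====
def Claim_equal_formatar_resultados : Prop := ∀ (resultados : List String), Dom_formatar_resultados resultados → Spec_formatar_resultados resultados (formatar_resultados resultados)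

-- ===== LEMMAS AND PROOFS =====
theorem pvCut_shift (cs : List Int) (i d : Nat) :
    pvCut cs (i + 1) (d + 1) = pvCut cs i d + 1 := by
  induction cs generalizing i with
  | nil => rfl
  | cons c cs ih =>
    simp only [pvCut]
    split_ifs with h
    · rfl
    · exact ih (i + 1)

theorem pvFoldl_append (L : List String) (a b : String) :
    List.foldl (fun r s => r ++ s) (a ++ b) L = a ++ List.foldl (fun r s => r ++ s) b L := by
  induction L generalizing b with
  | nil => rfl
  | cons x xs ih => simp only [List.foldl, String.append_assoc, ih]

theorem pvLoopA_eq (l : List String) (texto : String) (acc : Int) :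
    pvLoopA l texto acc =
      texto ++ String.join ((l.take (pvCut (pvCum acc l) 0 l.length)).map (fun r => r ++ " ")) := by
  induction l generalizing texto acc with
  | nil => simp [pvLoopA, pvCum, pvCut, String.join]
  | cons r rest ih =>
    simp only [pvLoopA, pvCum, pvCut]
    split_ifs with h
    · simp [String.join]
    · rw [ih]
      have : pvCut (pvCum (acc + ((PySem.Str.split₀ r).length : Int)) rest) 1 (rest.length + 1)
          = pvCut (pvCum (acc + ((PySem.Str.split₀ r).length : Int)) rest) 0 rest.length + 1 :=
        pvCut_shift _ 0 _
      simp only [List.length_cons, this, List.take_succ_cons, List.map_cons, String.join,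
        List.foldl_cons, String.append_assoc, String.empty_append, List.map_take]
      have h2 := pvFoldl_append ((List.map (fun r => r ++ " ") rest).take (pvCut (pvCum (acc + ((PySem.Str.split₀ r).length : Int)) rest) 0 rest.length)) (r ++ " ") ""
      simp only [String.append_empty, List.map_take] at h2 ⊢
      rw [h2, String.append_assoc]

-- ===== VERDICT (by name: the statement is the Claim_ definition above) =====
theorem formatar_resultados_spec : Claim_equal_formatar_resultados := by
  intro resultados _
  unfold Spec_formatar_resultados formatar_resultados formatar_resultados_alt
  simpa using pvLoopA_eq resultados "" 0
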